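-- pv_equiv track=rewrite | github.com/SaarShai/Primes-Equispaced | experiments/verify_6R.py | compute_mobius_sieve
-- ===== SOURCE A (Python) =====
-- def compute_mobius_sieve(limit):
--     """Compute mu and Mertens to limit."""
--     mu = [0] * (limit + 1)
--     mu[1] = 1
--     # smallest prime factor
--     spf = [0] * (limit + 1)
--     for i in range(2, limit + 1):
--         if spf[i] == 0:
--             for j in range(i, limit + 1, i):
--                 if spf[j] == 0:
--                     spf[j] = i
--     for n in range(2, limit + 1):
--         p = spf[n]
--         if (n // p) % p == 0:
--             mu[n] = 0
--         else:
--             mu[n] = -mu[n // p]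
--
--     M = [0] * (limit + 1)
--     s = 0
--     for i in range(1, limit + 1):
--         s += mu[i]
--         M[i] = s
--     return mu, M
-- ===== SOURCE B (Python) =====
-- def compute_mobius_sieve(limit):
--     """Compute mu and Mertens to limit."""
--     mu = [0] * (limit + 1)
--     mu[1] = 1
--     is_comp = [False] * (limit + 1)
--     primes = []
--     for i in range(2, limit + 1):
--         if not is_comp[i]:
--             primes.append(i)
--             mu[i] = -1
--         for p in primes:
--             ip = i * p
--             if ip > limit:
--                 break
--             is_comp[ip] = True
--             if i % p == 0:
--                 mu[ip] = 0
--                 break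
--             mu[ip] = -mu[i]
--     M = [0] * (limit + 1)
--     s = 0
--     for i in range(1, limit + 1):
--         s += mu[i]
--         M[i] = s
--     return mu, M
-- ===== Notes on version B (the rewrite author's own statement) =====
-- stated objective: alternative
-- what changed: Replaced the two-pass smallest-prime-factor sieve plus mu-recurrence with a one-pass Euler linear sieve that maintains a primes list and writes each mu value exactly once (each composite at its unique factorization i*p with p = smallest prime factor); the Mertens prefix-sum pass is unchanged.
import Mathlib
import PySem

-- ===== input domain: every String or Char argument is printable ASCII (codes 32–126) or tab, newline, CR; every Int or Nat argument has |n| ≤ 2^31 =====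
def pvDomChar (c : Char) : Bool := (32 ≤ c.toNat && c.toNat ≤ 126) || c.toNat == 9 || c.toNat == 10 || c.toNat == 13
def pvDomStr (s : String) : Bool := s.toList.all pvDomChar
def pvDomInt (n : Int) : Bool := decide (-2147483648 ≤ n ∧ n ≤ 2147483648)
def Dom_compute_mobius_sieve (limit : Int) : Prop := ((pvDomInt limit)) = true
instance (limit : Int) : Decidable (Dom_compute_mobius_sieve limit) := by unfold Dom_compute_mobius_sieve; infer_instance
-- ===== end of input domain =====

-- B computes the same (mu, Mertens) pair by a different algorithm: an Euler linear
-- sieve writing each mu cell once, instead of A's spf-table pass plus mu-recurrence pass.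

-- ===== PORT A =====
-- Literal port of A: [0]*(limit+1) -> List.replicate, mu[1]=1 -> pySetD (raises in Python
-- when limit < 1; excluded by Pre_); the loops become foldl over PySem.List.pyRange,
-- split into named helpers (spf table, mu recurrence, Mertens prefix sums).

def aSpf (limit : Int) : List Int :=
  (PySem.List.pyRange 2 (limit + 1) 1).foldl (fun spf i =>
      if PySem.List.pyGetD spf i 0 == 0 then
        (PySem.List.pyRange i (limit + 1) i).foldl (fun spf j =>
          if PySem.List.pyGetD spf j 0 == 0 then PySem.List.pySetD spf j i else spf) spf
      else spf)
    (List.replicate (limit + 1).toNat 0)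

def aMu (limit : Int) : List Int :=
  let spf := aSpf limit
  (PySem.List.pyRange 2 (limit + 1) 1).foldl (fun mu n =>
      let p := PySem.List.pyGetD spf n 0
      if PySem.Int.mod (PySem.Int.floordiv n p) p == 0 then
        PySem.List.pySetD mu n 0
      else
        PySem.List.pySetD mu n (-(PySem.List.pyGetD mu (PySem.Int.floordiv n p) 0)))
    (PySem.List.pySetD (List.replicate (limit + 1).toNat 0) 1 1)

-- the Mertens prefix-sum loop, textually identical in A and in B
def mertens (limit : Int) (mu : List Int) : List Int :=
  ((PySem.List.pyRange 1 (limit + 1) 1).foldl (fun (acc : List Int × Int) i =>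
      let s := acc.2 + PySem.List.pyGetD mu i 0
      (PySem.List.pySetD acc.1 i s, s)) (List.replicate (limit + 1).toNat 0, 0)).1

def compute_mobius_sieve (limit : Int) : List Int × List Int :=
  (aMu limit, mertens limit (aMu limit))

-- ===== PORT B =====
-- Port of B (Source B): one-pass Euler linear sieve over the state (mu, is_comp, primes),
-- then the same Mertens prefix-sum loop.

-- inner for-loop of the Euler sieve: iterate over the primes list, breaking on
-- i*p > limit or (after marking/writing) on p | i
def bInner (limit i : Int) (mu : List Int) (ic : List Bool) : List Int → List Int × List Bool
  | [] => (mu, ic)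
  | p :: ps =>
    let ip := i * p
    if limit < ip then (mu, ic)
    else
      let ic' := PySem.List.pySetD ic ip true
      if PySem.Int.mod i p == 0 then (PySem.List.pySetD mu ip 0, ic')
      else bInner limit i (PySem.List.pySetD mu ip (-(PySem.List.pyGetD mu i 0))) ic' ps

def bMu (limit : Int) : List Int :=
  ((PySem.List.pyRange 2 (limit + 1) 1).foldl
      (fun (st : List Int × List Bool × List Int) i =>
        let mu := st.1; let ic := st.2.1; let primes := st.2.2
        let (mu, primes) :=
          if PySem.List.pyGetD ic i false = false then
            (PySem.List.pySetD mu i (-1), primes ++ [i])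
          else (mu, primes)
        let (mu, ic) := bInner limit i mu ic primes
        (mu, ic, primes))
      (PySem.List.pySetD (List.replicate (limit + 1).toNat 0) 1 1,
       List.replicate (limit + 1).toNat false, ([] : List Int))).1

def compute_mobius_sieve_alt (limit : Int) : List Int × List Int :=
  (bMu limit, mertens limit (bMu limit))

-- ===== PRECONDITION & SPEC =====
-- Pre_ excludes limit < 1: there Python A's 'mu[1] = 1' raises IndexError.
def Pre_compute_mobius_sieve (limit : Int) : Prop := 1 ≤ limit
instance (limit : Int) : Decidable (Pre_compute_mobius_sieve limit) := by unfold Pre_compute_mobius_sieve; infer_instance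
def pvWitness_compute_mobius_sieve : Int := 6
def Spec_compute_mobius_sieve (limit : Int) (out : List Int × List Int) : Prop := out = compute_mobius_sieve_alt limit
instance (limit : Int) (out : List Int × List Int) : Decidable (Spec_compute_mobius_sieve limit out) := by unfold Spec_compute_mobius_sieve; infer_instance

-- ===== CLAIM (what is proved, stated in full; the proofs are below) =====
def Claim_equal_compute_mobius_sieve : Prop := ∀ (limit : Int), Dom_compute_mobius_sieve limit → Pre_compute_mobius_sieve limit → Spec_compute_mobius_sieve limit (compute_mobius_sieve limit)

-- ===== LEMMAS AND PROOFS =====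

-- generic getD/set helpers
theorem getD_set_self {α : Type} (l : List α) (n : Nat) (v d : α) (h : n < l.length) :
    (l.set n v).getD n d = v := by
  simp [List.getD_eq_getElem?_getD, List.getElem?_set_self h]

theorem getD_set_ne {α : Type} (l : List α) (m n : Nat) (v d : α) (h : m ≠ n) :
    (l.set m v).getD n d = l.getD n d := by
  simp [List.getD_eq_getElem?_getD, List.getElem?_set_ne h]

-- fold over List.range with an invariant
theorem foldl_range_inv {α : Type} (g : α → Nat → α) (P : Nat → α → Prop) (n : Nat) (init : α)
    (h0 : P 0 init) (hstep : ∀ k a, k < n → P k a → P (k + 1) (g a k)) :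
    P n ((List.range n).foldl g init) := by
  induction n with
  | zero => simpa using h0
  | succ n ih =>
    rw [List.range_succ, List.foldl_append]
    exact hstep n _ (Nat.lt_succ_self n) (ih (fun k a hk => hstep k a (Nat.lt_succ_of_lt hk)))

-- rewrite the outer python ranges into Nat folds
theorem pyRange_two_foldl {α : Type} (N : Nat) (f : α → Int → α) (init : α) :
    (PySem.List.pyRange 2 ((N : Int) + 1) 1).foldl f init
      = (List.range (N - 1)).foldl (fun s (k : Nat) => f s (2 + (k : Int))) init := by
  rw [PySem.List.pyRange_one, List.foldl_map]
  have h : (((N : Int) + 1) - 2).toNat = N - 1 := by omega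
  rw [h]

-- mu specification: the value both sieves compute at every cell
def muSpec (n : Nat) : Int :=
  if _h : n ≤ 1 then (if n = 1 then 1 else 0)
  else if (n / n.minFac) % n.minFac = 0 then 0 else -muSpec (n / n.minFac)
termination_by n
decreasing_by
  have h2 := (Nat.minFac_prime (show n ≠ 1 by omega)).two_le
  exact Nat.div_lt_self (by omega) (by omega)

theorem muSpec_zero : muSpec 0 = 0 := by rw [muSpec]; simp

theorem muSpec_one : muSpec 1 = 1 := by rw [muSpec]; simp

theorem muSpec_of_two_le {n : Nat} (h : 2 ≤ n) :
    muSpec n = if n.minFac ∣ n / n.minFac then 0 else -muSpec (n / n.minFac) := by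
  rw [muSpec]
  simp only [show ¬ n ≤ 1 by omega, dite_false, Nat.dvd_iff_mod_eq_zero]

theorem minFac_two_le {n : Nat} (h : 2 ≤ n) : 2 ≤ n.minFac :=
  (Nat.minFac_prime (by omega)).two_le

theorem muSpec_prime {p : Nat} (hp : p.Prime) : muSpec p = -1 := by
  rw [muSpec_of_two_le hp.two_le, hp.minFac_eq, Nat.div_self hp.pos]
  have h2 := hp.two_le
  have : ¬ p ∣ 1 := by
    intro hd
    have := Nat.le_of_dvd one_pos hd
    omega
  simp [this, muSpec_one]

theorem cof_two_le {j : Nat} (h2 : 2 ≤ j) (hnp : ¬ j.Prime) : 2 ≤ j / j.minFac := by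
  have hd := Nat.minFac_dvd j
  have hmul := Nat.div_mul_cancel hd
  have hp := Nat.minFac_prime (show j ≠ 1 by omega)
  by_contra h
  obtain ⟨q, hq⟩ : ∃ q, j / j.minFac = q := ⟨_, rfl⟩
  rw [hq] at h hmul
  have hq01 : q = 0 ∨ q = 1 := by omega
  rcases hq01 with rfl | rfl
  · rw [Nat.zero_mul] at hmul; omega
  · rw [one_mul] at hmul; exact hnp (hmul ▸ hp)

theorem minFac_mul_eq {i p : Nat} (hp : p.Prime) (hi : 2 ≤ i) (hle : p ≤ i.minFac) :
    (i * p).minFac = p := by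
  have hdvd : p ∣ i * p := dvd_mul_left p i
  have hne1 : i * p ≠ 1 := by nlinarith [hp.two_le]
  have hprime := Nat.minFac_prime hne1
  have h1 : (i * p).minFac ≤ p := Nat.minFac_le_of_dvd hp.two_le hdvd
  have h2 : p ≤ (i * p).minFac := by
    rcases (hprime.dvd_mul).mp (Nat.minFac_dvd (i * p)) with h | h
    · exact le_trans hle (Nat.minFac_le_of_dvd hprime.two_le h)
    · exact le_of_eq ((Nat.prime_dvd_prime_iff_eq hprime hp).mp h).symm
  omega

-- new-cell characterisation: t = i*p with p prime ≤ minFac i  ↔  t composite with cofactor i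
theorem newcell_iff {i t : Nat} (hi : 2 ≤ i) :
    (∃ p, p.Prime ∧ 2 ≤ p ∧ p ≤ i.minFac ∧ t = i * p) ↔
      (2 ≤ t ∧ ¬ t.Prime ∧ t / t.minFac = i) := by
  constructor
  · rintro ⟨p, hp, -, hle, rfl⟩
    have hmf : (i * p).minFac = p := minFac_mul_eq hp hi hle
    have h2 : 2 ≤ i * p := by nlinarith [hp.two_le]
    refine ⟨h2, ?_, by rw [hmf, Nat.mul_div_cancel _ hp.pos]⟩
    intro hpr
    have hd : p ∣ i * p := dvd_mul_left p i
    rcases (Nat.Prime.eq_one_or_self_of_dvd hpr p hd) with h | h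
    · exact absurd h (by have := hp.two_le; omega)
    · nlinarith [hp.two_le]
  · rintro ⟨h2, hnp, hcof⟩
    refine ⟨t.minFac, Nat.minFac_prime (by omega), minFac_two_le h2, ?_, ?_⟩
    · have hidvd : i ∣ t := ⟨t.minFac, by rw [← hcof, Nat.div_mul_cancel (Nat.minFac_dvd t)]⟩
      have hi1 : i ≠ 1 := by omega
      have hpm := Nat.minFac_prime hi1
      have : i.minFac ∣ t := dvd_trans (Nat.minFac_dvd i) hidvd
      exact Nat.minFac_le_of_dvd hpm.two_le this
    · rw [← hcof, Nat.div_mul_cancel (Nat.minFac_dvd t)]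

-- ---------- A side ----------

-- the generic marking pass of A's inner sieve loop
theorem foldl_mark (i : Int) (hi : i ≠ 0) :
    ∀ (js : List Int) (l : List Int), js.Pairwise (· < ·) →
    (∀ j ∈ js, 0 ≤ j ∧ j < (l.length : Int)) →
    (js.foldl (fun l j => if PySem.List.pyGetD l j 0 == 0 then PySem.List.pySetD l j i else l) l).length = l.length ∧
    ∀ t : Nat, (js.foldl (fun l j => if PySem.List.pyGetD l j 0 == 0 then PySem.List.pySetD l j i else l) l).getD t 0
      = if ((t : Int) ∈ js ∧ l.getD t 0 = 0) then i else l.getD t 0 := by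
  intro js
  induction js with
  | nil =>
    intro l _ _
    exact ⟨rfl, fun t => by simp⟩
  | cons j js ih =>
    intro l hpw hb
    obtain ⟨hj0, hjlt⟩ := hb j (by simp)
    rw [List.foldl_cons]
    have hget : PySem.List.pyGetD l j 0 = l.getD j.toNat 0 := PySem.List.pyGetD_of_nonneg l 0 hj0
    have hjnat : j.toNat < l.length := by omega
    have hjmem : j ∉ js := fun hm => absurd (List.rel_of_pairwise_cons hpw hm) (lt_irrefl j)
    by_cases h0 : l.getD j.toNat 0 = 0
    · have hcond : (PySem.List.pyGetD l j 0 == 0) = true := by rw [hget]; exact beq_iff_eq.mpr h0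
      rw [hcond, if_pos rfl, PySem.List.pySetD_of_nonneg l i hj0]
      have hlen1 : (l.set j.toNat i).length = l.length := by simp
      obtain ⟨ihlen, ihget⟩ := ih (l.set j.toNat i) hpw.of_cons (by
        intro x hx
        have := hb x (List.mem_cons_of_mem _ hx)
        omega)
      refine ⟨by rw [ihlen, hlen1], ?_⟩
      intro t
      rw [ihget t]
      by_cases ht : (t : Int) = j
      · have htj : t = j.toNat := by omega
        subst htj
        have hset1 : (l.set j.toNat i).getD j.toNat 0 = i := getD_set_self l j.toNat i 0 hjnat
        rw [hset1]
        have hnm : ¬ (((j.toNat : Int) ∈ js) ∧ i = 0) := by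
          rintro ⟨hm, hz⟩; exact hi hz
        rw [if_neg hnm, if_pos ⟨by rw [ht]; exact List.mem_cons_self .., h0⟩]
      · have htne : j.toNat ≠ t := by omega
        rw [getD_set_ne l j.toNat t i 0 htne]
        by_cases hm : (t : Int) ∈ js
        · have : (t : Int) ∈ j :: js := List.mem_cons_of_mem _ hm
          by_cases h0t : l.getD t 0 = 0
          · rw [if_pos ⟨hm, h0t⟩, if_pos ⟨this, h0t⟩]
          · rw [if_neg (by rintro ⟨_, hz⟩; exact h0t hz), if_neg (by rintro ⟨_, hz⟩; exact h0t hz)]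
        · have hnm : (t : Int) ∉ j :: js := by
            intro hmem
            rcases List.mem_cons.mp hmem with h | h
            · exact ht h
            · exact hm h
          rw [if_neg (by rintro ⟨hmm, _⟩; exact hm hmm), if_neg (by rintro ⟨hmm, _⟩; exact hnm hmm)]
    · have hcond : (PySem.List.pyGetD l j 0 == 0) = false := by
        rw [hget]; exact beq_eq_false_iff_ne.mpr h0
      rw [hcond]
      simp only [Bool.false_eq_true, if_false]
      obtain ⟨ihlen, ihget⟩ := ih l hpw.of_cons (by
        intro x hx; exact hb x (List.mem_cons_of_mem _ hx))
      refine ⟨ihlen, ?_⟩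
      intro t
      rw [ihget t]
      by_cases ht : (t : Int) = j
      · have htj : t = j.toNat := by omega
        subst htj
        rw [if_neg (by rintro ⟨hmm, _⟩; rw [ht] at hmm; exact hjmem hmm),
            if_neg (by rintro ⟨_, hz⟩; exact h0 hz)]
      · have hiff : ((t : Int) ∈ j :: js) ↔ ((t : Int) ∈ js) := by
          simp [List.mem_cons, ht]
        by_cases hc : ((t : Int) ∈ js) ∧ l.getD t 0 = 0
        · rw [if_pos hc, if_pos ⟨hiff.mpr hc.1, hc.2⟩]
        · rw [if_neg hc, if_neg (by rintro ⟨hmm, hz⟩; exact hc ⟨hiff.mp hmm, hz⟩)]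

def spfInv (N k : Nat) (l : List Int) : Prop :=
  l.length = N + 1 ∧ ∀ j : Nat, j < N + 1 → 2 ≤ j →
    l.getD j 0 = if j.minFac ≤ k then (j.minFac : Int) else 0

-- A's spf table holds the least prime factor
theorem pyRange_pairwise_lt (a b s : Int) (hs : 0 < s) : (PySem.List.pyRange a b s).Pairwise (· < ·) := by
  rw [PySem.List.pyRange_of_pos a b hs]
  refine List.pairwise_lt_range.map _ ?_
  intro x y hxy
  have hx : (x : Int) < (y : Int) := by exact_mod_cast hxy
  nlinarith

theorem aSpf_spec (N : Nat) (hN : 1 ≤ N) :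
    (aSpf (N : Int)).length = N + 1 ∧
    ∀ j : Nat, j < N + 1 → 2 ≤ j → (aSpf (N : Int)).getD j 0 = (j.minFac : Int) := by
  have hcast : ((N : Int) + 1).toNat = N + 1 := by omega
  unfold aSpf
  rw [pyRange_two_foldl N _ _]
  have main := foldl_range_inv
      (fun s (k : Nat) =>
        if (PySem.List.pyGetD s (2 + (k : Int)) 0 == 0) = true then
          List.foldl
            (fun spf j => if (PySem.List.pyGetD spf j 0 == 0) = true then PySem.List.pySetD spf j (2 + (k : Int)) else spf)
            s (PySem.List.pyRange (2 + (k : Int)) ((N : Int) + 1) (2 + (k : Int)))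
        else s)
      (fun k spf => spfInv N (k + 1) spf) (N - 1)
      (List.replicate ((N : Int) + 1).toNat 0)
      (by
        rw [hcast]
        refine ⟨List.length_replicate, ?_⟩
        intro j hj h2j
        rw [List.getD_replicate 0 hj]
        rw [if_neg (by have := minFac_two_le h2j; omega)])
      (by
        intro k spf hk hinv
        obtain ⟨hlen, hval⟩ := hinv
        beta_reduce
        have hik : (2 + (k : Int)) = (((k + 2 : Nat)) : Int) := by push_cast; ring
        rw [hik, PySem.List.pyGetD_natCast]
        have hkN : k + 2 < N + 1 := by omega
        have hcur := hval (k + 2) hkN (by omega)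
        by_cases hpr : (k + 2).minFac ≤ k + 1
        · -- i composite: no write
          rw [hcur, if_pos hpr]
          have hne : ((k + 2).minFac : Int) ≠ 0 := by
            have := minFac_two_le (show 2 ≤ k + 2 by omega); omega
          rw [beq_eq_false_iff_ne.mpr hne]
          simp only [Bool.false_eq_true, if_false]
          refine ⟨hlen, ?_⟩
          intro j hj h2j
          rw [hval j hj h2j]
          have hiff : (j.minFac ≤ k + 2) ↔ (j.minFac ≤ k + 1) := by
            constructor
            · intro hle
              rcases Nat.lt_or_ge j.minFac (k + 2) with h | h
              · omega
              · exfalso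
                have heq : j.minFac = k + 2 := by omega
                have hp : (k + 2).Prime := heq ▸ Nat.minFac_prime (show j ≠ 1 by omega)
                rw [hp.minFac_eq] at hpr
                omega
            · intro h; omega
          by_cases hc : j.minFac ≤ k + 1
          · rw [if_pos hc, if_pos (hiff.mpr hc)]
          · rw [if_neg hc, if_neg (fun h => hc (hiff.mp h))]
        · -- i prime: inner marking pass
          have hprime : (k + 2).Prime := by
            have h1 := Nat.minFac_le (show 0 < k + 2 by omega)
            have heq : (k + 2).minFac = k + 2 := by omega
            exact heq ▸ Nat.minFac_prime (by omega)
          rw [hcur, if_neg hpr, beq_self_eq_true]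
          simp only [if_true]
          have hipos : (0 : Int) < ((k + 2 : Nat) : Int) := by exact_mod_cast Nat.succ_pos _
          have hmark := foldl_mark ((k + 2 : Nat) : Int) (by omega)
              (PySem.List.pyRange ((k + 2 : Nat) : Int) ((N : Int) + 1) ((k + 2 : Nat) : Int)) spf
              (pyRange_pairwise_lt _ _ _ hipos)
              (by
                intro j hj
                rw [PySem.List.mem_pyRange_iff_of_pos hipos] at hj
                constructor
                · omega
                · rw [hlen]; omega)
          obtain ⟨hmlen, hmget⟩ := hmark
          refine ⟨by rw [hmlen, hlen], ?_⟩
          intro j hj h2j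
          rw [hmget j]
          have hmem : ((j : Int) ∈ PySem.List.pyRange ((k + 2 : Nat) : Int) ((N : Int) + 1) ((k + 2 : Nat) : Int))
              ↔ (k + 2 ≤ j ∧ j ≤ N ∧ (k + 2) ∣ j) := by
            rw [PySem.List.mem_pyRange_iff_of_pos hipos]
            constructor
            · rintro ⟨h1, h2, h3⟩
              have hle : k + 2 ≤ j := by exact_mod_cast h1
              have hdj : ((k + 2 : Nat) : Int) ∣ (j : Int) := by
                have : ((j : Int) - ((k + 2 : Nat) : Int)) + ((k + 2 : Nat) : Int) = (j : Int) := by ring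
                exact this ▸ dvd_add h3 dvd_rfl
              exact ⟨hle, by omega, by exact_mod_cast hdj⟩
            · rintro ⟨h1, h2, h3⟩
              refine ⟨by exact_mod_cast h1, by omega, ?_⟩
              have : ((k + 2 : Nat) : Int) ∣ (j : Int) := by exact_mod_cast h3
              exact dvd_sub this dvd_rfl
          by_cases hc1 : j.minFac ≤ k + 1
          · have hval0 : spf.getD j 0 = (j.minFac : Int) := by rw [hval j hj h2j, if_pos hc1]
            have hnz : spf.getD j 0 ≠ 0 := by
              rw [hval0]; have := minFac_two_le h2j; omega
            rw [if_neg (by rintro ⟨_, hz⟩; exact hnz hz), hval0, if_pos (by omega)]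
          · have hval0 : spf.getD j 0 = 0 := by rw [hval j hj h2j, if_neg hc1]
            by_cases hc2 : j.minFac = k + 2
            · have hdvd : (k + 2) ∣ j := hc2 ▸ Nat.minFac_dvd j
              have hle : k + 2 ≤ j := Nat.le_of_dvd (by omega) hdvd
              rw [if_pos ⟨hmem.mpr ⟨hle, by omega, hdvd⟩, hval0⟩, if_pos (by omega), hc2]
            · have hgt : k + 2 < j.minFac := by omega
              have hnmem : ¬ ((j : Int) ∈ PySem.List.pyRange ((k + 2 : Nat) : Int) ((N : Int) + 1) ((k + 2 : Nat) : Int)) := by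
                rw [hmem]
                rintro ⟨h1, h2, h3⟩
                have := Nat.minFac_le_of_dvd (show 2 ≤ k + 2 by omega) h3
                omega
              rw [if_neg (by rintro ⟨hmm, _⟩; exact hnmem hmm), hval0, if_neg (by omega)])
  obtain ⟨hlen, hval⟩ := main
  have hN1 : N - 1 + 1 = N := by omega
  rw [hN1] at hval
  refine ⟨hlen, ?_⟩
  intro j hj h2j
  rw [hval j hj h2j, if_pos]
  have h1 := Nat.minFac_le (show 0 < j by omega)
  omega

def muArr (N : Nat) : List Int := (List.range (N + 1)).map muSpec

-- A's mu list is muSpec at every cell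
theorem eq_muArr_of_getD {l : List Int} {N : Nat} (hlen : l.length = N + 1)
    (h : ∀ j : Nat, j < N + 1 → l.getD j 0 = muSpec j) : l = muArr N := by
  apply List.ext_getElem (by simp [muArr, hlen])
  intro j h1 h2
  have hj : j < N + 1 := by rw [hlen] at h1; exact h1
  rw [← List.getD_eq_getElem l 0 h1, h j hj]
  simp [muArr]

-- shared initial mu list: [0,1,0,...,0]
theorem mu_init_spec (N : Nat) (hN : 1 ≤ N) :
    (PySem.List.pySetD (List.replicate ((N : Int) + 1).toNat (0 : Int)) 1 1).length = N + 1 ∧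
    ∀ j : Nat, j < N + 1 →
      (PySem.List.pySetD (List.replicate ((N : Int) + 1).toNat 0) 1 (1 : Int)).getD j 0
        = if j ≤ 1 then muSpec j else 0 := by
  have hcast : ((N : Int) + 1).toNat = N + 1 := by omega
  have hset : PySem.List.pySetD (List.replicate ((N : Int) + 1).toNat (0 : Int)) 1 1
      = (List.replicate ((N : Int) + 1).toNat (0 : Int)).set 1 1 := by
    rw [PySem.List.pySetD_of_nonneg _ _ (by omega : (0:Int) ≤ 1)]
    norm_num
  rw [hset, hcast]
  refine ⟨by simp, ?_⟩
  intro j hj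
  match j with
  | 0 =>
    rw [getD_set_ne _ _ _ _ _ (by omega), List.getD_replicate 0 hj]
    simp [muSpec_zero]
  | 1 =>
    rw [getD_set_self _ _ _ _ (by simp; omega)]
    simp [muSpec_one]
  | (m + 2) =>
    rw [getD_set_ne _ _ _ _ _ (by omega), List.getD_replicate 0 hj]
    simp

theorem aMu_spec (N : Nat) (hN : 1 ≤ N) : aMu (N : Int) = muArr N := by
  simp only [aMu]
  rw [pyRange_two_foldl N _ _]
  obtain ⟨hslen, hsval⟩ := aSpf_spec N hN
  obtain ⟨hilen, hival⟩ := mu_init_spec N hN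
  have main := foldl_range_inv
      (fun s (k : Nat) =>
        if (PySem.Int.mod (PySem.Int.floordiv (2 + (k : Int)) (PySem.List.pyGetD (aSpf (N : Int)) (2 + (k : Int)) 0))
              (PySem.List.pyGetD (aSpf (N : Int)) (2 + (k : Int)) 0) == 0) = true then
          PySem.List.pySetD s (2 + (k : Int)) 0
        else
          PySem.List.pySetD s (2 + (k : Int))
            (-PySem.List.pyGetD s (PySem.Int.floordiv (2 + (k : Int)) (PySem.List.pyGetD (aSpf (N : Int)) (2 + (k : Int)) 0)) 0))
      (fun k mu => mu.length = N + 1 ∧ ∀ j : Nat, j < N + 1 →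
        mu.getD j 0 = if j ≤ k + 1 then muSpec j else 0)
      (N - 1)
      (PySem.List.pySetD (List.replicate ((N : Int) + 1).toNat 0) 1 1)
      ⟨hilen, hival⟩
      (by
        intro k mu hk hinv
        obtain ⟨hlen, hval⟩ := hinv
        beta_reduce
        have hik : (2 + (k : Int)) = (((k + 2 : Nat)) : Int) := by push_cast; ring
        have hkN : k + 2 < N + 1 := by omega
        rw [hik, PySem.List.pyGetD_natCast, hsval (k + 2) hkN (by omega)]
        have hm2 : 2 ≤ (k + 2).minFac := minFac_two_le (by omega)
        rw [PySem.Int.floordiv_natCast, PySem.Int.mod_natCast]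
        have hq : (k + 2) / (k + 2).minFac < k + 2 := Nat.div_lt_self (by omega) (by omega)
        have hqval : mu.getD ((k + 2) / (k + 2).minFac) 0 = muSpec ((k + 2) / (k + 2).minFac) := by
          rw [hval _ (by omega), if_pos (by omega)]
        by_cases hdvd : (k + 2) / (k + 2).minFac % (k + 2).minFac = 0
        · rw [show ((((k + 2) / (k + 2).minFac % (k + 2).minFac : Nat) : Int) == 0) = true by
            rw [beq_iff_eq]; exact_mod_cast congrArg (Nat.cast : Nat → Int) hdvd]
          simp only [if_true]
          rw [PySem.List.pySetD_natCast]
          refine ⟨by simp [hlen], ?_⟩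
          intro j hj
          by_cases hjk : j = k + 2
          · subst hjk
            rw [getD_set_self _ _ _ _ (by omega), if_pos (by omega),
              muSpec_of_two_le (by omega : 2 ≤ k + 2),
              if_pos (Nat.dvd_iff_mod_eq_zero.mpr hdvd)]
          · rw [getD_set_ne _ _ _ _ _ (Ne.symm hjk), hval j hj]
            by_cases hle : j ≤ k + 1
            · rw [if_pos hle, if_pos (by omega)]
            · rw [if_neg hle, if_neg (by omega)]
        · rw [show ((((k + 2) / (k + 2).minFac % (k + 2).minFac : Nat) : Int) == 0) = false by
            rw [beq_eq_false_iff_ne]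
            exact fun h => hdvd (by exact_mod_cast h)]
          simp only [Bool.false_eq_true, if_false]
          rw [PySem.List.pyGetD_natCast, hqval, PySem.List.pySetD_natCast]
          refine ⟨by simp [hlen], ?_⟩
          intro j hj
          by_cases hjk : j = k + 2
          · subst hjk
            rw [getD_set_self _ _ _ _ (by omega), if_pos (by omega),
              muSpec_of_two_le (by omega : 2 ≤ k + 2),
              if_neg (fun h => hdvd (Nat.dvd_iff_mod_eq_zero.mp h))]
          · rw [getD_set_ne _ _ _ _ _ (Ne.symm hjk), hval j hj]
            by_cases hle : j ≤ k + 1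
            · rw [if_pos hle, if_pos (by omega)]
            · rw [if_neg hle, if_neg (by omega)])
  obtain ⟨hlen, hval⟩ := main
  refine eq_muArr_of_getD hlen ?_
  intro j hj
  rw [hval j hj, if_pos (by omega)]

-- ---------- B side ----------

def natPrimesUpTo (k : Nat) : List Nat :=
  (List.range (k + 1)).filter (fun m => decide m.Prime)

theorem mem_natPrimesUpTo {k p : Nat} : p ∈ natPrimesUpTo k ↔ p.Prime ∧ p ≤ k := by
  simp only [natPrimesUpTo, List.mem_filter, List.mem_range, decide_eq_true_eq]
  constructor
  · rintro ⟨h1, h2⟩; exact ⟨h2, by omega⟩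
  · rintro ⟨h1, h2⟩; exact ⟨by omega, h1⟩

theorem pairwise_natPrimesUpTo (k : Nat) : (natPrimesUpTo k).Pairwise (· < ·) :=
  List.Pairwise.sublist List.filter_sublist List.pairwise_lt_range

-- B's inner loop over the primes list
theorem bInner_spec (N i : Nat) (hi : 2 ≤ i) (_hiN : i ≤ N) :
    ∀ (ps : List Nat) (m : Nat) (mu : List Int) (ic : List Bool),
    2 ≤ m → m ≤ i.minFac →
    (∀ p ∈ ps, p.Prime) → ps.Pairwise (· < ·) → (∀ p ∈ ps, m ≤ p) →
    (∀ p, p.Prime → m ≤ p → p ≤ i → p ∈ ps) →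
    mu.length = N + 1 → ic.length = N + 1 →
    mu.getD i 0 = muSpec i →
    (bInner (N : Int) (i : Int) mu ic (ps.map (fun p : Nat => (p : Int)))).1.length = N + 1 ∧
    (bInner (N : Int) (i : Int) mu ic (ps.map (fun p : Nat => (p : Int)))).2.length = N + 1 ∧
    (∀ t : Nat, t < N + 1 →
      ((∃ p, p.Prime ∧ m ≤ p ∧ p ≤ i.minFac ∧ t = i * p) →
        (bInner (N : Int) (i : Int) mu ic (ps.map (fun p : Nat => (p : Int)))).1.getD t 0 = muSpec t ∧
        (bInner (N : Int) (i : Int) mu ic (ps.map (fun p : Nat => (p : Int)))).2.getD t false = true) ∧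
      (¬ (∃ p, p.Prime ∧ m ≤ p ∧ p ≤ i.minFac ∧ t = i * p) →
        (bInner (N : Int) (i : Int) mu ic (ps.map (fun p : Nat => (p : Int)))).1.getD t 0 = mu.getD t 0 ∧
        (bInner (N : Int) (i : Int) mu ic (ps.map (fun p : Nat => (p : Int)))).2.getD t false = ic.getD t false)) := by
  intro ps
  induction ps with
  | nil =>
    intro m mu ic hm2 hmf hpr hpw hlb hcomp hmul hicl hmui
    exfalso
    have hminf : i.minFac ∈ ([] : List Nat) :=
      hcomp i.minFac (Nat.minFac_prime (by omega)) hmf (Nat.minFac_le (by omega))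
    simp at hminf
  | cons p0 ps' ih =>
    intro m mu ic hm2 hmf hpr hpw hlb hcomp hmul hicl hmui
    have hp0 : p0.Prime := hpr p0 (by simp)
    have hp02 : 2 ≤ p0 := hp0.two_le
    have hmp0 : m ≤ p0 := hlb p0 (by simp)
    have hminfmem : i.minFac ∈ p0 :: ps' :=
      hcomp i.minFac (Nat.minFac_prime (by omega)) hmf (Nat.minFac_le (by omega))
    have hp0le : p0 ≤ i.minFac := by
      rcases List.mem_cons.mp hminfmem with h | h
      · omega
      · exact le_of_lt (List.rel_of_pairwise_cons hpw h)
    have hnope : ∀ p, p.Prime → m ≤ p → p < p0 → False := by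
      intro p hp hmp hpp0
      have hmem : p ∈ p0 :: ps' := hcomp p hp hmp (by
        have h1 := Nat.minFac_le (show 0 < i by omega)
        omega)
      rcases List.mem_cons.mp hmem with h | h
      · omega
      · have := List.rel_of_pairwise_cons hpw h; omega
    simp only [List.map_cons, bInner]
    have hip : (i : Int) * (p0 : Int) = ((i * p0 : Nat) : Int) := by push_cast; ring
    rw [hip]
    by_cases hstop : (N : Int) < ((i * p0 : Nat) : Int)
    · rw [if_pos hstop]
      have hstopN : N < i * p0 := by exact_mod_cast hstop
      refine ⟨hmul, hicl, ?_⟩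
      intro t ht
      constructor
      · rintro ⟨p, hp, hmp, hple, rfl⟩
        exfalso
        have hpge : p0 ≤ p := by
          by_contra hc
          exact hnope p hp hmp (by omega)
        have h2 : i * p0 ≤ i * p := Nat.mul_le_mul_left i hpge
        omega
      · intro _; exact ⟨rfl, rfl⟩
    · rw [if_neg hstop]
      have hipN : i * p0 ≤ N := by
        have h1 : ((i * p0 : Nat) : Int) ≤ (N : Int) := not_lt.mp hstop
        exact_mod_cast h1
    -- the rest of the else-branch
      simp only [PySem.List.pySetD_natCast, PySem.Int.mod_natCast]
      by_cases hdvd : p0 ∣ i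
      · have hmod0 : i % p0 = 0 := Nat.dvd_iff_mod_eq_zero.mp hdvd
        rw [show (((i % p0 : Nat) : Int) == 0) = true by
          rw [beq_iff_eq]; exact_mod_cast congrArg (Nat.cast : Nat → Int) hmod0]
        simp only [if_true]
        have hp0eq : p0 = i.minFac := le_antisymm hp0le (Nat.minFac_le_of_dvd hp02 hdvd)
        refine ⟨by simp [hmul], by simp [hicl], ?_⟩
        intro t ht
        have huniq : ∀ p, p.Prime → m ≤ p → p ≤ i.minFac → t = i * p → t = i * p0 := by
          intro p hp hmp hple hte
          have hpge : p0 ≤ p := by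
            by_contra hc
            exact hnope p hp hmp (by omega)
          have : p = p0 := by omega
          rw [hte, this]
        constructor
        · rintro ⟨p, hp, hmp, hple, rfl⟩
          have hte : i * p = i * p0 := huniq p hp hmp hple rfl
          rw [hte]
          have hbmu : i * p0 < mu.length := by omega
          have hbic : i * p0 < ic.length := by omega
          refine ⟨?_, getD_set_self _ _ _ _ hbic⟩
          rw [getD_set_self _ _ _ _ hbmu]
          have h4 : 2 ≤ i * p0 := by nlinarith
          rw [muSpec_of_two_le h4, minFac_mul_eq hp0 hi hp0le,
            Nat.mul_div_cancel i hp0.pos, if_pos (hp0eq ▸ hdvd)]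
        · intro hnc
          have htne : t ≠ i * p0 := by
            intro hte
            exact hnc ⟨p0, hp0, hmp0, hp0le, hte⟩
          exact ⟨getD_set_ne _ _ _ _ _ (fun h => htne h.symm),
                 getD_set_ne _ _ _ _ _ (fun h => htne h.symm)⟩
      · have hmodne : i % p0 ≠ 0 := fun h => hdvd (Nat.dvd_iff_mod_eq_zero.mpr h)
        rw [show (((i % p0 : Nat) : Int) == 0) = false by
          rw [beq_eq_false_iff_ne]
          exact fun h => hmodne (by exact_mod_cast h)]
        simp only [Bool.false_eq_true, if_false]
        have hlt : p0 < i.minFac :=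
          lt_of_le_of_ne hp0le (fun h => hdvd (h ▸ Nat.minFac_dvd i))
        rw [PySem.List.pyGetD_natCast, hmui]
        have hiip : i < i * p0 := by nlinarith
        have hmuval : -muSpec i = muSpec (i * p0) := by
          have h4 : 2 ≤ i * p0 := by nlinarith
          rw [muSpec_of_two_le h4, minFac_mul_eq hp0 hi (le_of_lt hlt),
            Nat.mul_div_cancel i hp0.pos, if_neg hdvd]
        obtain ⟨l1, l2, hpt⟩ := ih (p0 + 1) (mu.set (i * p0) (-muSpec i)) (ic.set (i * p0) true)
          (by omega) hlt
          (fun p hp => hpr p (List.mem_cons_of_mem _ hp))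
          hpw.of_cons
          (fun p hp => by have := List.rel_of_pairwise_cons hpw hp; omega)
          (by
            intro p hp hp1 hpi
            have hmem : p ∈ p0 :: ps' := hcomp p hp (by omega) hpi
            rcases List.mem_cons.mp hmem with h | h
            · omega
            · exact h)
          (by simp [hmul]) (by simp [hicl])
          (by rw [getD_set_ne _ _ _ _ _ (by omega)]; exact hmui)
        refine ⟨l1, l2, ?_⟩
        intro t ht
        obtain ⟨hpos, hneg⟩ := hpt t ht
        have hbmu : i * p0 < mu.length := by omega
        have hbic : i * p0 < ic.length := by omega
        constructor
        · rintro ⟨p, hp, hmp, hple, rfl⟩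
          by_cases hpp0 : p = p0
          · have hnc2 : ¬ (∃ q, q.Prime ∧ p0 + 1 ≤ q ∧ q ≤ i.minFac ∧ i * p = i * q) := by
              rintro ⟨q, hq, hq1, hq2, hqe⟩
              have hqq : p = q := Nat.eq_of_mul_eq_mul_left (by omega) hqe
              omega
            obtain ⟨hm1, hm2'⟩ := hneg hnc2
            rw [hm1, hm2', hpp0, getD_set_self _ _ _ _ hbmu, getD_set_self _ _ _ _ hbic]
            exact ⟨hmuval, rfl⟩
          · have hpge : p0 + 1 ≤ p := by
              by_contra hc
              exact hnope p hp hmp (by omega)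
            exact hpos ⟨p, hp, hpge, hple, rfl⟩
        · intro hnc
          have hnc2 : ¬ (∃ q, q.Prime ∧ p0 + 1 ≤ q ∧ q ≤ i.minFac ∧ t = i * q) := by
            rintro ⟨q, hq, hq1, hq2, hqe⟩
            exact hnc ⟨q, hq, by omega, hq2, hqe⟩
          have htne : t ≠ i * p0 := by
            intro hte
            exact hnc ⟨p0, hp0, hmp0, le_of_lt hlt, hte⟩
          obtain ⟨hm1, hm2'⟩ := hneg hnc2
          rw [hm1, hm2', getD_set_ne _ _ _ _ _ (fun h => htne h.symm),
            getD_set_ne _ _ _ _ _ (fun h => htne h.symm)]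
          exact ⟨rfl, rfl⟩

-- B's mu list is muSpec at every cell
theorem natPrimesUpTo_succ (m : Nat) :
    natPrimesUpTo (m + 1) = natPrimesUpTo m ++ (if (m + 1).Prime then [m + 1] else []) := by
  unfold natPrimesUpTo
  rw [List.range_succ, List.filter_append]
  congr 1
  by_cases h : (m + 1).Prime <;> simp [h]

def bInv (N k : Nat) (st : List Int × List Bool × List Int) : Prop :=
  st.1.length = N + 1 ∧ st.2.1.length = N + 1 ∧
  st.2.2 = (natPrimesUpTo k).map (fun p : Nat => (p : Int)) ∧
  (∀ j : Nat, j < N + 1 → (st.2.1.getD j false = true ↔ (2 ≤ j ∧ ¬ j.Prime ∧ j / j.minFac ≤ k))) ∧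
  (∀ j : Nat, j < N + 1 → st.1.getD j 0 =
    if j = 1 ∨ (j.Prime ∧ j ≤ k) ∨ (2 ≤ j ∧ ¬ j.Prime ∧ j / j.minFac ≤ k) then muSpec j else 0)

theorem bMu_spec (N : Nat) (hN : 1 ≤ N) : bMu (N : Int) = muArr N := by
  have hcast : ((N : Int) + 1).toNat = N + 1 := by omega
  obtain ⟨hilen, hival⟩ := mu_init_spec N hN
  simp only [bMu]
  rw [pyRange_two_foldl N _ _]
  have main := foldl_range_inv
      (fun (s : List Int × List Bool × List Int) (k : Nat) =>
          ((bInner ((N : Int)) (2 + (k : Int))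
                (if PySem.List.pyGetD s.2.1 (2 + (k : Int)) false = false then
                    (PySem.List.pySetD s.1 (2 + (k : Int)) (-1), s.2.2 ++ [2 + (k : Int)])
                  else (s.1, s.2.2)).1
                s.2.1
                (if PySem.List.pyGetD s.2.1 (2 + (k : Int)) false = false then
                    (PySem.List.pySetD s.1 (2 + (k : Int)) (-1), s.2.2 ++ [2 + (k : Int)])
                  else (s.1, s.2.2)).2).1,
            (bInner ((N : Int)) (2 + (k : Int))
                (if PySem.List.pyGetD s.2.1 (2 + (k : Int)) false = false then
                    (PySem.List.pySetD s.1 (2 + (k : Int)) (-1), s.2.2 ++ [2 + (k : Int)])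
                  else (s.1, s.2.2)).1
                s.2.1
                (if PySem.List.pyGetD s.2.1 (2 + (k : Int)) false = false then
                    (PySem.List.pySetD s.1 (2 + (k : Int)) (-1), s.2.2 ++ [2 + (k : Int)])
                  else (s.1, s.2.2)).2).2,
            (if PySem.List.pyGetD s.2.1 (2 + (k : Int)) false = false then
                (PySem.List.pySetD s.1 (2 + (k : Int)) (-1), s.2.2 ++ [2 + (k : Int)])
              else (s.1, s.2.2)).2))
      (fun k st => bInv N (k + 1) st) (N - 1)
      (PySem.List.pySetD (List.replicate ((N : Int) + 1).toNat 0) 1 1,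
       List.replicate ((N : Int) + 1).toNat false, ([] : List Int))
      (by
        refine ⟨hilen, by simp [hcast], by simp [show natPrimesUpTo (0 + 1) = ([] : List Nat) from by decide], ?_, ?_⟩
        · intro j hj
          rw [hcast, List.getD_replicate false hj]
          simp only [Bool.false_eq_true, false_iff]
          rintro ⟨a, b, c⟩
          have := cof_two_le a b
          omega
        · intro j hj
          rw [hival j hj]
          match j with
          | 0 =>
            rw [if_pos (by omega), muSpec_zero, if_neg]
            rintro (h | ⟨a, b⟩ | ⟨a, b, c⟩)
            · omega
            · exact Nat.not_prime_zero a
            · omega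
          | 1 => rw [if_pos (by omega), if_pos (Or.inl rfl)]
          | (m + 2) =>
            rw [if_neg (by omega), if_neg]
            rintro (h | ⟨a, b⟩ | ⟨a, b, c⟩)
            · omega
            · have := a.two_le; omega
            · have := cof_two_le a b; omega)
      (by
        intro k st hk hinv
        obtain ⟨hl1, hl2, hps, hicv, hmuv⟩ := hinv
        beta_reduce
        have hik : (2 + (k : Int)) = (((k + 2 : Nat)) : Int) := by push_cast; ring
        rw [hik, PySem.List.pyGetD_natCast]
        have hkN : k + 2 < N + 1 := by omega
        have hm2 : 2 ≤ (k + 2).minFac := minFac_two_le (by omega)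
        have hcof : (k + 2) / (k + 2).minFac < k + 2 := Nat.div_lt_self (by omega) (by omega)
        by_cases hpr : (k + 2).Prime
        · -- i prime: phase 1 fires
          have hcond : st.2.1.getD (k + 2) false = false := by
            rw [Bool.eq_false_iff]
            intro htrue
            exact ((hicv (k + 2) hkN).mp htrue).2.1 hpr
          rw [if_pos hcond]
          dsimp only
          rw [PySem.List.pySetD_natCast, hps,
            show (natPrimesUpTo (k + 1)).map (fun p : Nat => (p : Int)) ++ [(((k + 2 : Nat)) : Int)]
                = (natPrimesUpTo (k + 2)).map (fun p : Nat => (p : Int)) by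
              rw [show k + 2 = (k + 1) + 1 from rfl, natPrimesUpTo_succ (k + 1), if_pos hpr]
              simp]
          obtain ⟨r1, r2, rpt⟩ := bInner_spec N (k + 2) (by omega) (by omega) (natPrimesUpTo (k + 2)) 2
            (st.1.set (k + 2) (-1)) st.2.1 (by omega) hm2
            (fun p hp => (mem_natPrimesUpTo.mp hp).1)
            (pairwise_natPrimesUpTo _)
            (fun p hp => (mem_natPrimesUpTo.mp hp).1.two_le)
            (fun p hp h2p hpi => mem_natPrimesUpTo.mpr ⟨hp, by omega⟩)
            (by simp [hl1]) hl2
            (by rw [getD_set_self _ _ _ _ (by omega)]; exact (muSpec_prime hpr).symm)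
          refine ⟨r1, r2, rfl, ?_, ?_⟩
          · intro j hj
            obtain ⟨hpos, hneg⟩ := rpt j hj
            by_cases hex : ∃ p, p.Prime ∧ 2 ≤ p ∧ p ≤ (k + 2).minFac ∧ j = (k + 2) * p
            · rw [(hpos hex).2]
              have hcc := (newcell_iff (show 2 ≤ k + 2 by omega)).mp hex
              exact ⟨fun _ => ⟨hcc.1, hcc.2.1, by omega⟩, fun _ => rfl⟩
            · rw [(hneg hex).2, hicv j hj]
              constructor
              · rintro ⟨a, b, c⟩; exact ⟨a, b, by omega⟩
              · rintro ⟨a, b, c⟩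
                refine ⟨a, b, ?_⟩
                rcases Nat.lt_or_ge (j / j.minFac) (k + 2) with h | h
                · omega
                · exact absurd ((newcell_iff (show 2 ≤ k + 2 by omega)).mpr ⟨a, b, by omega⟩) hex
          · intro j hj
            obtain ⟨hpos, hneg⟩ := rpt j hj
            by_cases hex : ∃ p, p.Prime ∧ 2 ≤ p ∧ p ≤ (k + 2).minFac ∧ j = (k + 2) * p
            · rw [(hpos hex).1]
              have hcc := (newcell_iff (show 2 ≤ k + 2 by omega)).mp hex
              rw [if_pos (Or.inr (Or.inr ⟨hcc.1, hcc.2.1, by omega⟩))]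
            · rw [(hneg hex).1]
              by_cases hj2 : j = k + 2
              · subst hj2
                rw [getD_set_self _ _ _ _ (by omega),
                  if_pos (Or.inr (Or.inl ⟨hpr, by omega⟩)), muSpec_prime hpr]
              · rw [getD_set_ne _ _ _ _ _ (Ne.symm hj2), hmuv j hj]
                have hiffc : (j = 1 ∨ (j.Prime ∧ j ≤ k + 1) ∨ (2 ≤ j ∧ ¬ j.Prime ∧ j / j.minFac ≤ k + 1)) ↔
                    (j = 1 ∨ (j.Prime ∧ j ≤ k + 2) ∨ (2 ≤ j ∧ ¬ j.Prime ∧ j / j.minFac ≤ k + 2)) := by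
                  constructor
                  · rintro (h | ⟨a, b⟩ | ⟨a, b, c⟩)
                    exacts [Or.inl h, Or.inr (Or.inl ⟨a, by omega⟩), Or.inr (Or.inr ⟨a, b, by omega⟩)]
                  · rintro (h | ⟨a, b⟩ | ⟨a, b, c⟩)
                    · exact Or.inl h
                    · exact Or.inr (Or.inl ⟨a, by omega⟩)
                    · refine Or.inr (Or.inr ⟨a, b, ?_⟩)
                      rcases Nat.lt_or_ge (j / j.minFac) (k + 2) with h' | h'
                      · omega
                      · exact absurd ((newcell_iff (show 2 ≤ k + 2 by omega)).mpr ⟨a, b, by omega⟩) hex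
                by_cases hc : j = 1 ∨ (j.Prime ∧ j ≤ k + 1) ∨ (2 ≤ j ∧ ¬ j.Prime ∧ j / j.minFac ≤ k + 1)
                · rw [if_pos hc, if_pos (hiffc.mp hc)]
                · rw [if_neg hc, if_neg (fun h => hc (hiffc.mpr h))]
        · -- i composite: phase 1 skipped
          have hcond : st.2.1.getD (k + 2) false = true :=
            (hicv (k + 2) hkN).mpr ⟨by omega, hpr, by omega⟩
          rw [if_neg (show ¬ (st.2.1.getD (k + 2) false = false) from by rw [hcond]; simp)]
          dsimp only
          rw [hps,
            show natPrimesUpTo (k + 1) = natPrimesUpTo (k + 2) by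
              rw [show k + 2 = (k + 1) + 1 from rfl, natPrimesUpTo_succ (k + 1), if_neg hpr,
                List.append_nil]]
          obtain ⟨r1, r2, rpt⟩ := bInner_spec N (k + 2) (by omega) (by omega) (natPrimesUpTo (k + 2)) 2
            st.1 st.2.1 (by omega) hm2
            (fun p hp => (mem_natPrimesUpTo.mp hp).1)
            (pairwise_natPrimesUpTo _)
            (fun p hp => (mem_natPrimesUpTo.mp hp).1.two_le)
            (fun p hp h2p hpi => mem_natPrimesUpTo.mpr ⟨hp, by omega⟩)
            hl1 hl2
            (by rw [hmuv (k + 2) hkN, if_pos (Or.inr (Or.inr ⟨by omega, hpr, by omega⟩))])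
          refine ⟨r1, r2, rfl, ?_, ?_⟩
          · intro j hj
            obtain ⟨hpos, hneg⟩ := rpt j hj
            by_cases hex : ∃ p, p.Prime ∧ 2 ≤ p ∧ p ≤ (k + 2).minFac ∧ j = (k + 2) * p
            · rw [(hpos hex).2]
              have hcc := (newcell_iff (show 2 ≤ k + 2 by omega)).mp hex
              exact ⟨fun _ => ⟨hcc.1, hcc.2.1, by omega⟩, fun _ => rfl⟩
            · rw [(hneg hex).2, hicv j hj]
              constructor
              · rintro ⟨a, b, c⟩; exact ⟨a, b, by omega⟩
              · rintro ⟨a, b, c⟩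
                refine ⟨a, b, ?_⟩
                rcases Nat.lt_or_ge (j / j.minFac) (k + 2) with h | h
                · omega
                · exact absurd ((newcell_iff (show 2 ≤ k + 2 by omega)).mpr ⟨a, b, by omega⟩) hex
          · intro j hj
            obtain ⟨hpos, hneg⟩ := rpt j hj
            by_cases hex : ∃ p, p.Prime ∧ 2 ≤ p ∧ p ≤ (k + 2).minFac ∧ j = (k + 2) * p
            · rw [(hpos hex).1]
              have hcc := (newcell_iff (show 2 ≤ k + 2 by omega)).mp hex
              rw [if_pos (Or.inr (Or.inr ⟨hcc.1, hcc.2.1, by omega⟩))]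
            · rw [(hneg hex).1, hmuv j hj]
              have hiffc : (j = 1 ∨ (j.Prime ∧ j ≤ k + 1) ∨ (2 ≤ j ∧ ¬ j.Prime ∧ j / j.minFac ≤ k + 1)) ↔
                  (j = 1 ∨ (j.Prime ∧ j ≤ k + 2) ∨ (2 ≤ j ∧ ¬ j.Prime ∧ j / j.minFac ≤ k + 2)) := by
                constructor
                · rintro (h | ⟨a, b⟩ | ⟨a, b, c⟩)
                  exacts [Or.inl h, Or.inr (Or.inl ⟨a, by omega⟩), Or.inr (Or.inr ⟨a, b, by omega⟩)]
                · rintro (h | ⟨a, b⟩ | ⟨a, b, c⟩)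
                  · exact Or.inl h
                  · refine Or.inr (Or.inl ⟨a, ?_⟩)
                    rcases Nat.lt_or_ge j (k + 2) with h' | h'
                    · omega
                    · exact absurd (show j = k + 2 by omega) (fun he => hpr (he ▸ a))
                  · refine Or.inr (Or.inr ⟨a, b, ?_⟩)
                    rcases Nat.lt_or_ge (j / j.minFac) (k + 2) with h' | h'
                    · omega
                    · exact absurd ((newcell_iff (show 2 ≤ k + 2 by omega)).mpr ⟨a, b, by omega⟩) hex
              by_cases hc : j = 1 ∨ (j.Prime ∧ j ≤ k + 1) ∨ (2 ≤ j ∧ ¬ j.Prime ∧ j / j.minFac ≤ k + 1)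
              · rw [if_pos hc, if_pos (hiffc.mp hc)]
              · rw [if_neg hc, if_neg (fun h => hc (hiffc.mpr h))])
  have hN1 : N - 1 + 1 = N := by omega
  obtain ⟨hl1, hl2, hps, hicv, hmuv⟩ := main
  rw [hN1] at hmuv
  refine eq_muArr_of_getD hl1 ?_
  intro j hj
  rw [hmuv j hj]
  match j with
  | 0 =>
    rw [if_neg, muSpec_zero]
    rintro (h | ⟨a, b⟩ | ⟨a, b, c⟩)
    · omega
    · exact Nat.not_prime_zero a
    · omega
  | 1 => rw [if_pos (Or.inl rfl)]
  | (m + 2) =>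
    by_cases hp : (m + 2).Prime
    · rw [if_pos (Or.inr (Or.inl ⟨hp, by omega⟩))]
    · have hcf : (m + 2) / (m + 2).minFac ≤ N := by
        have h1 := Nat.div_lt_self (show 0 < m + 2 by omega) (show 1 < (m + 2).minFac by
          have := minFac_two_le (show 2 ≤ m + 2 by omega); omega)
        omega
      rw [if_pos (Or.inr (Or.inr ⟨by omega, hp, hcf⟩))]

-- ===== VERDICT (by name: the statement is the Claim_ definition above) =====
theorem compute_mobius_sieve_spec : Claim_equal_compute_mobius_sieve := by
  intro limit _ hpre
  unfold Spec_compute_mobius_sieve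
  have hpre' : 1 ≤ limit := hpre
  obtain ⟨N, rfl⟩ : ∃ N : Nat, limit = (N : Int) := ⟨limit.toNat, by omega⟩
  have hN : 1 ≤ N := by exact_mod_cast hpre'
  show compute_mobius_sieve (N : Int) = compute_mobius_sieve_alt (N : Int)
  unfold compute_mobius_sieve compute_mobius_sieve_alt
  rw [aMu_spec N hN, bMu_spec N hN]
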